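-- pv_equiv track=rewrite | github.com/miraliahmadli/CS101 | lab8/file_man.py | extract_line
-- ===== SOURCE A (Python) =====
-- def extract_line(line):
--     st = 0
--     lst = []
--     line = line.replace('"', "")
--     for i in range(len(line)):
--         if line[i] == ",":
--             if line[i+1] == " ":
--                 continue
--             else:
--                 lst.append(line[st : i])
--                 st = i+1
--     lst.append(line[st:])
--     return lst
-- ===== SOURCE B (Python) =====
-- def extract_line(line):
--     # Different decomposition: walk the quote-stripped line BACK-TO-FRONT,
--     # building tokens right-to-left; a comma whose right neighbour (tracked in
--     # `nxt`) is not a space closes the token being built.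
--     line = line.replace('"', "")
--     parts = []
--     cur = []
--     nxt = None
--     for ch in reversed(line):
--         if ch == "," and nxt != " ":
--             parts.append("".join(reversed(cur)))
--             cur = []
--         else:
--             cur.append(ch)
--         nxt = ch
--     parts.append("".join(reversed(cur)))
--     parts.reverse()
--     return parts
-- ===== Notes on version B (the rewrite author's own statement) =====
-- stated objective: alternative
-- what changed: B walks the quote-stripped line back-to-front building tokens right-to-left with a one-character lookbehind register instead of A's forward index loop with a start marker and slicing.
-- outside the precondition, e.g. on extract_line(','): A raises IndexError, B returns ['', '']
import Mathlib
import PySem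

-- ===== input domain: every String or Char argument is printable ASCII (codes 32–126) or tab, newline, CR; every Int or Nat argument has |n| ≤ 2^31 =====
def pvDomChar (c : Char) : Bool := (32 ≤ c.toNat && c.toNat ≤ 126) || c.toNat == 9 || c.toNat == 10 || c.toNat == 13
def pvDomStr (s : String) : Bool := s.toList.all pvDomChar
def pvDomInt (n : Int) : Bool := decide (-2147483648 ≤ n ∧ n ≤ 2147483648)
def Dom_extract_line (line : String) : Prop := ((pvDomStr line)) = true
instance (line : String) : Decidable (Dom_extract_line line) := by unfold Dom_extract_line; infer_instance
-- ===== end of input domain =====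

-- B re-splits the line back-to-front with a lookbehind register instead of A's forward
-- index/slice loop (alternative decomposition, same cost); on a trailing comma,
-- excluded by Pre_, A raises IndexError while B returns a trailing empty token.


-- ===== PORT A =====
-- loop body of A's 'for i in range(len(line))' (pyGetD is exact here: line[i] is in
-- range for every i the loop visits, and line[i+1] is only out of range outside Pre_)
def pvStepA (l : List Char) (acc : Int × List String) (i : Int) : Int × List String :=
  if PySem.List.pyGetD l i ' ' = ',' then
    if PySem.List.pyGetD l (i + 1) ' ' = ' ' then acc
    else (i + 1, acc.2 ++ [String.ofList (PySem.List.slice l (some acc.1) (some i))])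
  else acc

def extract_line (line : String) : List String :=
  let l := (PySem.Str.replace line "\"" "").toList
  let r := (PySem.List.pyRange 0 (l.length : Int) 1).foldl (pvStepA l) (0, [])
  r.2 ++ [String.ofList (PySem.List.slice l (some r.1) none)]

-- ===== PORT B =====
-- loop body of B's 'for ch in reversed(line)': state (parts, cur, nxt)
def pvStepB (acc : List String × List Char × Option Char) (ch : Char) :
    List String × List Char × Option Char :=
  if ch = ',' ∧ acc.2.2 ≠ some ' ' then
    (acc.1 ++ [String.ofList acc.2.1.reverse], [], some ch)
  else
    (acc.1, acc.2.1 ++ [ch], some ch)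

def extract_line_alt (line : String) : List String :=
  let l := (PySem.Str.replace line "\"" "").toList
  let r := l.reverse.foldl pvStepB ([], [], none)
  (r.1 ++ [String.ofList r.2.1.reverse]).reverse

-- ===== PRECONDITION & SPEC =====
-- Pre_ excludes exactly the inputs on which A raises IndexError: those whose
-- quote-stripped text ends with ',' (then line[i+1] reads past the end).
def Pre_extract_line (line : String) : Prop :=
  (PySem.Str.replace line "\"" "").toList.getLast? ≠ some ','
instance (line : String) : Decidable (Pre_extract_line line) := by
  unfold Pre_extract_line; infer_instance
def pvWitness_extract_line : String := "a,b, c"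

def Spec_extract_line (line : String) (out : List String) : Prop := out = extract_line_alt line
instance (line : String) (out : List String) : Decidable (Spec_extract_line line out) := by unfold Spec_extract_line; infer_instance

-- ===== CLAIM (what is proved, stated in full; the proofs are below) =====
def Claim_equal_extract_line : Prop := ∀ (line : String), Dom_extract_line line → Pre_extract_line line → Spec_extract_line line (extract_line line)

-- ===== LEMMAS AND PROOFS =====

-- canonical recursive splitter: (current token, later tokens)
def pvFP : List Char → List Char × List String
  | [] => ([], [])
  | c :: rest =>
    let p := pvFP rest
    if c = ',' ∧ rest.head? ≠ some ' ' then ([], String.ofList p.1 :: p.2)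
    else (c :: p.1, p.2)

lemma pvB_foldr (cs : List Char) :
    cs.foldr (fun ch acc => pvStepB acc ch) ([], [], none) =
      ((pvFP cs).2.reverse, (pvFP cs).1.reverse, cs.head?) := by
  induction cs with
  | nil => rfl
  | cons c rest ih =>
      rw [List.foldr_cons, ih]
      by_cases h : c = ',' ∧ rest.head? ≠ some ' ' <;>
        simp only [pvStepB, pvFP] <;> simp [h]

lemma pvB_eq (line : String) :
    extract_line_alt line =
      String.ofList (pvFP (PySem.Str.replace line "\"" "").toList).1 ::
        (pvFP (PySem.Str.replace line "\"" "").toList).2 := by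
  show ((((PySem.Str.replace line "\"" "").toList.reverse.foldl pvStepB ([], [], none)).1 ++
      [String.ofList ((PySem.Str.replace line "\"" "").toList.reverse.foldl pvStepB ([], [], none)).2.1.reverse]).reverse) = _
  rw [List.foldl_reverse, pvB_foldr]
  simp

lemma pvA_inv (cs : List Char) (hP : cs.getLast? ≠ some ',') :
    ∀ (k j st : Nat), j ≤ cs.length → st ≤ j → cs.length - j = k → ∀ (lst : List String),
      (let r := (PySem.List.pyRange (j : Int) (cs.length : Int) 1).foldl (pvStepA cs) ((st : Int), lst)
       r.2 ++ [String.ofList (PySem.List.slice cs (some r.1) none)]) =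
      lst ++ String.ofList ((cs.drop st).take (j - st) ++ (pvFP (cs.drop j)).1) :: (pvFP (cs.drop j)).2 := by
  intro k
  induction k with
  | zero =>
      intro j st hj hst hk lst
      have hje : j = cs.length := by omega
      subst hje
      rw [PySem.List.pyRange_one_eq_nil (le_refl _)]
      simp only [List.foldl_nil]
      rw [PySem.List.slice_from cs (a := (st:Int)) (by positivity)]
      simp only [List.drop_length, pvFP, Int.toNat_natCast, List.append_nil]
      rw [List.take_of_length_le (by simp)]
  | succ k ih =>
      intro j st hj hst hk lst
      have hjlt : j < cs.length := by omega
      have hcast : ((j : Int) + 1) = (((j + 1 : Nat)) : Int) := by push_cast; ring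
      have hd : cs.drop j = cs[j] :: cs.drop (j + 1) := List.drop_eq_getElem_cons hjlt
      have hgj : PySem.List.pyGetD cs (j : Int) ' ' = cs[j] := by
        rw [PySem.List.pyGetD_natCast]
        simp [List.getD_eq_getElem?_getD, List.getElem?_eq_getElem hjlt]
      have htake : List.take (j + 1 - st) (cs.drop st) = List.take (j - st) (cs.drop st) ++ [cs[j]] := by
        rw [show j + 1 - st = (j - st) + 1 by omega, List.take_add_one, List.getElem?_drop,
          show st + (j - st) = j by omega, List.getElem?_eq_getElem hjlt]
        rfl
      rw [PySem.List.pyRange_one_cons (by exact_mod_cast hjlt)]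
      simp only [List.foldl_cons]
      by_cases hc : cs[j] = ','
      · -- l[j] = ','
        by_cases hsp : PySem.List.pyGetD cs ((j : Int) + 1) ' ' = ' '
        · -- comma followed by space: A continues, B keeps the comma in the token
          have hj1 : j + 1 < cs.length := by
            rcases Nat.lt_or_ge (j + 1) cs.length with h | h
            · exact h
            · exfalso
              apply hP
              rw [List.getLast?_eq_getElem?, show cs.length - 1 = j by omega,
                List.getElem?_eq_getElem hjlt, hc]
          have hsp' : cs[j + 1] = ' ' := by
            rw [hcast, PySem.List.pyGetD_natCast] at hsp
            rwa [List.getD_eq_getElem?_getD, List.getElem?_eq_getElem hj1] at hsp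
          have hhead : (cs.drop (j + 1)).head? = some ' ' := by
            rw [List.drop_eq_getElem_cons hj1]
            simp [hsp']
          have hstep : pvStepA cs ((st : Int), lst) (j : Int) = ((st : Int), lst) := by
            simp [pvStepA, hgj, hc, hsp]
          rw [hstep, hcast, ih (j + 1) st (by omega) (by omega) (by omega) lst]
          rw [hd]
          simp only [pvFP, hhead]
          rw [if_neg (by simp), htake, hc]
          simp
        · -- splitting comma: A closes the slice, B starts a new token
          have hhead : ¬ (cs.drop (j + 1)).head? = some ' ' := by
            rcases Nat.lt_or_ge (j + 1) cs.length with h | h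
            · rw [List.drop_eq_getElem_cons h]
              simp only [List.head?_cons]
              intro hcon
              apply hsp
              rw [hcast, PySem.List.pyGetD_natCast,
                List.getD_eq_getElem?_getD, List.getElem?_eq_getElem h]
              simpa using hcon
            · rw [List.drop_eq_nil_of_le h]
              simp
          have hstep : pvStepA cs ((st : Int), lst) (j : Int) =
              ((j : Int) + 1, lst ++ [String.ofList (List.take (j - st) (cs.drop st))]) := by
            simp only [pvStepA, hgj, hc, if_neg hsp]
            rw [PySem.List.slice_toNat cs (by positivity) (by positivity)]
            simp
          rw [hstep, hcast, ih (j + 1) (j + 1) (by omega) (by omega) (by omega) _]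
          rw [hd]
          simp only [pvFP]
          rw [if_pos ⟨hc, hhead⟩]
          simp
      · -- not a comma: both keep the character in the current token
        have hstep : pvStepA cs ((st : Int), lst) (j : Int) = ((st : Int), lst) := by
          simp [pvStepA, hgj, hc]
        rw [hstep, hcast, ih (j + 1) st (by omega) (by omega) (by omega) lst]
        rw [hd]
        simp only [pvFP]
        rw [if_neg (by simp [hc]), htake]
        simp

theorem extract_line_spec : Claim_equal_extract_line := by
  intro line _ hPre
  unfold Spec_extract_line
  rw [pvB_eq]
  unfold extract_line
  have h := pvA_inv (PySem.Str.replace line "\"" "").toList hPre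
    (PySem.Str.replace line "\"" "").toList.length 0 0 (by omega) (by omega) (by omega) []
  simpa using h
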